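-- pv_equiv track=rewrite | github.com/facebookresearch/seamless_communication | src/seamless_communication/cli/m4t/train/cleaners.py | merge_tailo_init_final
-- ===== SOURCE A (Python) =====
-- def merge_tailo_init_final(text):
--     sps = text.strip().split()
--     results = []
--     last_syllable = ""
--     for sp in sps:
--         if sp == "NULLINIT":
--             continue
--         last_syllable += sp
--         if sp[-1].isnumeric():
--             results.append(last_syllable)
--             last_syllable = ""
--     if last_syllable != "":
--         results.append(last_syllable)
--     return " ".join(results)
-- ===== SOURCE B (Python) =====
-- def merge_tailo_init_final(text):
--     toks = [t for t in text.strip().split() if t != "NULLINIT"]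
--     words = []
--     for t in reversed(toks):
--         if t[-1].isnumeric() or not words:
--             words = [t] + words
--         else:
--             words = [t + words[0]] + words[1:]
--     return " ".join(words)
-- ===== Notes on version B (the rewrite author's own statement) =====
-- stated objective: alternative
-- what changed: Replaces A's left-to-right accumulator loop (growing a pending syllable and flushing it at numeric boundaries, plus a final flush) with a NULLINIT-filtering comprehension followed by a right-to-left pass that builds the word list back-to-front, merging each non-boundary token into the word in front of it, so no pending-state flush is needed.
import Mathlib
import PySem

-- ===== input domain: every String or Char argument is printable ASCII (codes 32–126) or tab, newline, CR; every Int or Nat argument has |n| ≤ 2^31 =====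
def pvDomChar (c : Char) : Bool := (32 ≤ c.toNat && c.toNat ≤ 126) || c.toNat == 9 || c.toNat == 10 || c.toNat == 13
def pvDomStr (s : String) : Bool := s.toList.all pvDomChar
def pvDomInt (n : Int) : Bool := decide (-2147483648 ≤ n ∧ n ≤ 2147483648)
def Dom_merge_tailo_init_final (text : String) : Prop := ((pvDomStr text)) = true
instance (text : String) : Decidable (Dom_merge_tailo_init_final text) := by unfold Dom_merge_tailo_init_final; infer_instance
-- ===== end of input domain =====

-- B builds the word list back-to-front from a NULLINIT-filtered token list instead of
-- A's left-to-right pending-syllable accumulator with a final flush; same return value.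

-- shared tiny helper: the expression `sp[-1].isnumeric()` occurring in both Pythons.
-- isnumeric coincides with isdigit on the printable-ASCII domain (exact there);
-- the `none` case (empty token = IndexError in Python) is unreachable: split() yields no empty tokens.
def mtifLastIsNumeric (t : List Char) : Bool :=
  match PySem.Chars.pyGet? t (-1) with
  | some c => PySem.Chars.isdigit c
  | none => false

-- ===== PORT A =====
def merge_tailo_init_final (text : String) : String :=
  let sps := PySem.Chars.split₀ (PySem.Chars.strip text.toList)
  let st := sps.foldl (fun (st : List (List Char) × List Char) sp =>
      if sp = "NULLINIT".toList then st
      else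
        let last := st.2 ++ sp
        if mtifLastIsNumeric sp then (st.1 ++ [last], []) else (st.1, last)) ([], [])
  let results := if st.2 ≠ [] then st.1 ++ [st.2] else st.1
  String.ofList (PySem.Chars.join [' '] results)

-- ===== PORT B =====
def merge_tailo_init_final_alt (text : String) : String :=
  let toks := (PySem.Chars.split₀ (PySem.Chars.strip text.toList)).filter
      (fun t => t ≠ "NULLINIT".toList)
  let words := toks.reverse.foldl (fun words t =>
      if mtifLastIsNumeric t || words.isEmpty then t :: words
      else match words with
        | [] => [t]          -- unreachable (guarded by words.isEmpty above): totality guard for words[0]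
        | w :: ws => (t ++ w) :: ws) []
  String.ofList (PySem.Chars.join [' '] words)

-- ===== PRECONDITION & SPEC =====
def Spec_merge_tailo_init_final (text : String) (out : String) : Prop := out = merge_tailo_init_final_alt text
instance (text : String) (out : String) : Decidable (Spec_merge_tailo_init_final text out) := by unfold Spec_merge_tailo_init_final; infer_instance

-- ===== CLAIM (what is proved, stated in full; the proofs are below) =====
def Claim_equal_merge_tailo_init_final : Prop := ∀ (text : String), Dom_merge_tailo_init_final text → Spec_merge_tailo_init_final text (merge_tailo_init_final text)

-- ===== LEMMAS AND PROOFS =====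

lemma mtifNullLit : "NULLINIT".toList = ['N','U','L','L','I','N','I','T'] := rfl

-- abbreviations for the two loop bodies (definitionally the ones inside the ports)
def mtifStepA (st : List (List Char) × List Char) (sp : List Char) : List (List Char) × List Char :=
  if sp = "NULLINIT".toList then st
  else
    let last := st.2 ++ sp
    if mtifLastIsNumeric sp then (st.1 ++ [last], []) else (st.1, last)

def mtifStepB (words : List (List Char)) (t : List Char) : List (List Char) :=
  if mtifLastIsNumeric t || words.isEmpty then t :: words
  else match words with
    | [] => [t]
    | w :: ws => (t ++ w) :: ws

-- B's loop, read as structural recursion from the right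
def mtifGroup : List (List Char) → List (List Char)
  | [] => []
  | t :: ts => mtifStepB (mtifGroup ts) t

lemma mtifFoldB_eq_group (toks : List (List Char)) :
    toks.reverse.foldl mtifStepB [] = mtifGroup toks := by
  rw [List.foldl_reverse]
  induction toks with
  | nil => rfl
  | cons t ts ih => simp [List.foldr_cons, ih, mtifGroup]

-- prepending a pending syllable onto a grouped word list
def mtifPre (l : List Char) (g : List (List Char)) : List (List Char) :=
  match g with
  | [] => if l = [] then [] else [l]
  | w :: ws => (l ++ w) :: ws

lemma mtifPre_nil (g : List (List Char)) : mtifPre [] g = g := by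
  cases g <;> simp [mtifPre]

-- every word produced by split₀ is nonempty
lemma split₀_go_ne_nil (s cur : List Char) (acc : List (List Char))
    (h : ∀ w ∈ acc, w ≠ []) : ∀ w ∈ PySem.Chars.split₀.go s cur acc, w ≠ [] := by
  induction s generalizing cur acc with
  | nil =>
    intro w hw
    by_cases hc : cur.isEmpty
    · simp only [PySem.Chars.split₀.go, hc, if_true, List.mem_reverse] at hw
      exact h w hw
    · simp [PySem.Chars.split₀.go, hc] at hw
      rcases hw with hw | hw
      · exact h w hw
      · subst hw; simpa [List.isEmpty_iff] using hc
  | cons c rest ih =>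
    intro w hw
    by_cases hs : PySem.Chars.isspace c
    · by_cases hc : cur.isEmpty
      · simp only [PySem.Chars.split₀.go, hs, hc, if_true] at hw
        exact ih [] acc h w hw
      · simp only [PySem.Chars.split₀.go, hs, hc, if_true, if_false] at hw
        refine ih [] (cur.reverse :: acc) ?_ w hw
        intro v hv
        rcases List.mem_cons.mp hv with hv | hv
        · subst hv; simpa [List.isEmpty_iff] using hc
        · exact h v hv
    · simp only [PySem.Chars.split₀.go, hs, if_false] at hw
      exact ih (c :: cur) acc h w hw

lemma split₀_ne_nil (s : List Char) : ∀ w ∈ PySem.Chars.split₀ s, w ≠ [] :=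
  split₀_go_ne_nil s [] [] (by intro w hw; cases hw)

-- A's loop skips NULLINIT tokens ⇒ it equals the same loop over the filtered list
lemma mtifFoldA_filter (toks : List (List Char)) (st : List (List Char) × List Char) :
    toks.foldl mtifStepA st
      = (toks.filter (fun t => t ≠ "NULLINIT".toList)).foldl mtifStepA st := by
  induction toks generalizing st with
  | nil => rfl
  | cons t ts ih =>
    by_cases h : t = "NULLINIT".toList
    · simp [List.foldl_cons, List.filter_cons, mtifNullLit, h, mtifStepA, ih]
    · rw [mtifNullLit] at h
      simp [List.foldl_cons, List.filter_cons, mtifNullLit, h, ih]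

-- main invariant: finishing A's loop over NULLINIT-free, nonempty tokens
lemma mtifFoldA_group (toks : List (List Char))
    (hne : ∀ t ∈ toks, t ≠ []) (hnn : ∀ t ∈ toks, t ≠ "NULLINIT".toList)
    (results : List (List Char)) (last : List Char) :
    (let st := toks.foldl mtifStepA (results, last)
     if st.2 ≠ [] then st.1 ++ [st.2] else st.1)
      = results ++ mtifPre last (mtifGroup toks) := by
  induction toks generalizing results last with
  | nil =>
    by_cases h : last = [] <;> simp [mtifGroup, mtifPre, h]
  | cons t ts ih =>
    have ht : t ≠ [] := hne t (List.mem_cons_self ..)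
    have htn : t ≠ "NULLINIT".toList := hnn t (List.mem_cons_self ..)
    rw [mtifNullLit] at htn
    have hne' : ∀ u ∈ ts, u ≠ [] := fun u hu => hne u (List.mem_cons_of_mem _ hu)
    have hnn' : ∀ u ∈ ts, u ≠ "NULLINIT".toList := fun u hu => hnn u (List.mem_cons_of_mem _ hu)
    simp only [List.foldl_cons]
    by_cases hb : mtifLastIsNumeric t
    · have hstep : mtifStepA (results, last) t = (results ++ [last ++ t], []) := by
        simp [mtifStepA, mtifNullLit, htn, hb]
      rw [hstep, ih hne' hnn']
      have hg : mtifGroup (t :: ts) = t :: mtifGroup ts := by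
        simp [mtifGroup, mtifStepB, hb]
      rw [mtifPre_nil, hg]
      simp [mtifPre]
    · have hstep : mtifStepA (results, last) t = (results, last ++ t) := by
        simp [mtifStepA, mtifNullLit, htn, hb]
      rw [hstep, ih hne' hnn']
      have hlt : last ++ t ≠ [] := by simp [ht]
      cases hgts : mtifGroup ts with
      | nil =>
        have hg : mtifGroup (t :: ts) = [t] := by
          simp [mtifGroup, mtifStepB, hb, hgts]
        simp [hg, mtifPre, hlt]
      | cons w ws =>
        have hg : mtifGroup (t :: ts) = (t ++ w) :: ws := by
          simp [mtifGroup, mtifStepB, hb, hgts]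
        simp [hg, mtifPre, List.append_assoc]

-- ===== VERDICT (by name: the statement is the Claim_ definition above) =====
theorem merge_tailo_init_final_spec : Claim_equal_merge_tailo_init_final := by
  intro text _
  unfold Spec_merge_tailo_init_final merge_tailo_init_final merge_tailo_init_final_alt
  set sps := PySem.Chars.split₀ (PySem.Chars.strip text.toList) with hsps
  set toks := sps.filter (fun t => t ≠ "NULLINIT".toList) with htoks
  have hA : sps.foldl (fun (st : List (List Char) × List Char) sp =>
      if sp = "NULLINIT".toList then st
      else
        let last := st.2 ++ sp
        if mtifLastIsNumeric sp then (st.1 ++ [last], []) else (st.1, last)) ([], [])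
      = toks.foldl mtifStepA ([], []) := mtifFoldA_filter sps ([], [])
  have hB : toks.reverse.foldl (fun words t =>
      if mtifLastIsNumeric t || words.isEmpty then t :: words
      else match words with
        | [] => [t]
        | w :: ws => (t ++ w) :: ws) []
      = mtifGroup toks := mtifFoldB_eq_group toks
  simp only [hA, hB]
  have hne : ∀ t ∈ toks, t ≠ [] := by
    intro t ht
    exact split₀_ne_nil _ t (List.mem_of_mem_filter ht)
  have hnn : ∀ t ∈ toks, t ≠ "NULLINIT".toList := by
    intro t ht
    simpa using List.of_mem_filter ht
  have := mtifFoldA_group toks hne hnn [] []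
  simp only at this
  rw [this, mtifPre_nil, List.nil_append]
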